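-- pv_equiv track=rewrite | github.com/caltech-quantum-topology/fkcompute | src/fkcompute/inversion/permutations.py | _iter_fold_to_perms
-- ===== SOURCE A (Python) =====
-- from typing import Callable, Dict, Iterator, List, Optional, Tuple
--
-- def _iter_fold_to_perms(perm_options: List[List[Tuple[int, int]]]) -> Iterator[List[int]]:
--     """Yield valid permutation lists lazily.
--
--     This is a generator equivalent of :func:`_fold_to_perms` that avoids
--     constructing the full cross-product in memory.
--     """
--
--     def _recurse(i: int, used_dsts: set[int], out: List[int]) -> Iterator[List[int]]:
--         if i >= len(perm_options):
--             # out is already in the correct order (sorted by src label).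
--             yield list(out)
--             return
--
--         for _, dst in perm_options[i]:
--             if dst in used_dsts:
--                 continue
--             used_dsts.add(dst)
--             out.append(dst)
--             yield from _recurse(i + 1, used_dsts, out)
--             out.pop()
--             used_dsts.remove(dst)
--
--     yield from _recurse(0, set(), [])
-- ===== SOURCE B (Python) =====
-- from typing import Iterator, List, Tuple
--
-- def _iter_fold_to_perms(perm_options: List[List[Tuple[int, int]]]) -> Iterator[List[int]]:
--     """Yield valid permutation lists: grow all valid prefixes level by level."""
--     prefixes: List[List[int]] = [[]]
--     for options in perm_options:
--         prefixes = [p + [dst] for p in prefixes for _, dst in options if dst not in p]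
--     yield from prefixes
-- ===== Notes on version B (the rewrite author's own statement) =====
-- stated objective: alternative
-- what changed: Replaces A's recursive backtracking generator (DFS with a mutable used-dsts set and out list) by an iterative level-wise fold that rebuilds the list of all valid prefixes for each position via a comprehension, pruning duplicate dsts by membership in the prefix itself.
import Mathlib
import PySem

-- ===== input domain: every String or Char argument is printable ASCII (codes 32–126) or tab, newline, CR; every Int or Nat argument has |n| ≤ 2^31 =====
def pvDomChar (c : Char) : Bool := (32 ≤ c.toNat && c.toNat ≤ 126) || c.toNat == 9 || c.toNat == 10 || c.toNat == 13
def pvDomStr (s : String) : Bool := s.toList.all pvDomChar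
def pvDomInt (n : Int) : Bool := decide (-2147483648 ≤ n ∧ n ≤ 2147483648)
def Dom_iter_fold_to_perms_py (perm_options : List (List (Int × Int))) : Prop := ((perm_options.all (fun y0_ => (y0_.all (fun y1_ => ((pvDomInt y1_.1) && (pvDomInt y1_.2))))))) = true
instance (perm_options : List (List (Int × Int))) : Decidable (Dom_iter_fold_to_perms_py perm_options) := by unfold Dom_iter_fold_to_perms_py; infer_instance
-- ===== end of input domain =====

-- B replaces A's recursive backtracking generator (used-set pruning DFS) by an iterative
-- level-wise fold that grows the list of all valid prefixes position by position.

-- ===== PORT A =====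
-- _recurse(i, used_dsts, out): iterate over perm_options[i], skip a used dst,
-- otherwise recurse with dst added to the set and appended to out (the Python
-- mutates and restores; the pure recursion passes the extended set/list down).
def pvRecA (opts : List (List (Int × Int))) (used : PySem.Set Int) (out : List Int) : List (List Int) :=
  match opts with
  | [] => [out]
  | o :: rest =>
    o.foldl (fun acc p =>
      if PySem.Set.contains used p.2 then acc
      else acc ++ pvRecA rest (PySem.Set.add used p.2) (out ++ [p.2])) []

def iter_fold_to_perms_py (perm_options : List (List (Int × Int))) : List (List Int) :=
  pvRecA perm_options PySem.Set.empty []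

-- ===== PORT B =====
-- [p + [dst] for p in prefixes for _, dst in options if dst not in p]
def pvStepB (prefixes : List (List Int)) (options : List (Int × Int)) : List (List Int) :=
  prefixes.flatMap (fun p =>
    options.filterMap (fun q => if p.contains q.2 then none else some (p ++ [q.2])))

def iter_fold_to_perms_py_alt (perm_options : List (List (Int × Int))) : List (List Int) :=
  perm_options.foldl pvStepB [[]]

-- ===== PRECONDITION & SPEC =====
def Spec_iter_fold_to_perms_py (perm_options : List (List (Int × Int))) (out : List (List Int)) : Prop := out = iter_fold_to_perms_py_alt perm_options
instance (perm_options : List (List (Int × Int))) (out : List (List Int)) : Decidable (Spec_iter_fold_to_perms_py perm_options out) := by unfold Spec_iter_fold_to_perms_py; infer_instance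

-- ===== CLAIM (what is proved, stated in full; the proofs are below) =====
def Claim_equal_iter_fold_to_perms_py : Prop := ∀ (perm_options : List (List (Int × Int))), Dom_iter_fold_to_perms_py perm_options → Spec_iter_fold_to_perms_py perm_options (iter_fold_to_perms_py perm_options)

-- ===== LEMMAS AND PROOFS =====

theorem pv_contains_ofList (p : List Int) (x : Int) :
    PySem.Set.contains (PySem.Set.ofList p) x = p.contains x := by
  rw [Bool.eq_iff_iff]
  simp [PySem.Set.mem_ofList]

-- B's frontier fold, started from any frontier, is A's DFS run from each prefix
theorem pv_fold_eq_recA (opts : List (List (Int × Int))) :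
    ∀ (prefixes : List (List Int)),
    opts.foldl pvStepB prefixes
      = prefixes.flatMap (fun p => pvRecA opts (PySem.Set.ofList p) p) := by
  induction opts with
  | nil =>
    intro prefixes
    simp [pvRecA]
  | cons o rest ih =>
    intro prefixes
    rw [List.foldl_cons, ih]
    show (pvStepB prefixes o).flatMap _ = _
    unfold pvStepB
    rw [List.flatMap_assoc]
    apply List.flatMap_congr
    intro p _
    rw [List.filterMap_eq_flatMap_toList, List.flatMap_assoc]
    show _ = pvRecA (o :: rest) (PySem.Set.ofList p) p
    show _ = o.foldl (fun acc q =>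
      if PySem.Set.contains (PySem.Set.ofList p) q.2 then acc
      else acc ++ pvRecA rest (PySem.Set.add (PySem.Set.ofList p) q.2) (p ++ [q.2])) []
    have hfold : (fun (acc : List (List Int)) (q : Int × Int) =>
        if PySem.Set.contains (PySem.Set.ofList p) q.2 then acc
        else acc ++ pvRecA rest (PySem.Set.add (PySem.Set.ofList p) q.2) (p ++ [q.2]))
      = (fun acc q => acc ++ (if PySem.Set.contains (PySem.Set.ofList p) q.2 then []
          else pvRecA rest (PySem.Set.add (PySem.Set.ofList p) q.2) (p ++ [q.2]))) := by
      funext acc q; split <;> simp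
    rw [hfold, PySem.List.foldl_append_eq_flatMap]
    apply List.flatMap_congr
    intro q _
    rw [pv_contains_ofList]
    by_cases hq : p.contains q.2
    · simp at hq
      simp [hq]
    · simp only [hq, Bool.false_eq_true, if_false, Option.toList_some, List.flatMap_cons,
        List.flatMap_nil, List.append_nil]
      rw [← PySem.Set.ofList_append_singleton]

-- ===== VERDICT (by name: the statement is the Claim_ definition above) =====
theorem iter_fold_to_perms_py_spec : Claim_equal_iter_fold_to_perms_py := by
  unfold Claim_equal_iter_fold_to_perms_py
  intro opts _
  unfold Spec_iter_fold_to_perms_py iter_fold_to_perms_py iter_fold_to_perms_py_alt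
  rw [pv_fold_eq_recA]
  simp [PySem.Set.empty, PySem.Set.ofList_nil]
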